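-- pv_equiv track=rewrite | github.com/P6a6/RGBDisplay | server/modes/ambient/bouncing_box.py | _build_text_pixels
-- ===== SOURCE A (Python) =====
-- WIDTH  = 64
--
-- HEIGHT = 64
--
-- _FONT = {
--     'P': (0x7F, 0x09, 0x09, 0x09, 0x06),
--     'A': (0x7E, 0x11, 0x11, 0x11, 0x7E),
--     'R': (0x7F, 0x09, 0x19, 0x29, 0x46),
--     'S': (0x46, 0x49, 0x49, 0x49, 0x31),
-- }
--
-- def _build_text_pixels(text: str) -> list[tuple[int, int]]:
--     raw, cx = [], 0
--     for ch in text: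
--         bm = _FONT.get(ch.upper())
--         if bm is None:
--             cx += 6; continue
--         for col, byte in enumerate(bm):
--             for row in range(7):
--                 if byte & (1 << row):
--                     raw.append((cx + col, row))
--         cx += 6
--     tw = cx - 1
--     x0 = (WIDTH  - tw) // 2
--     y0 = (HEIGHT - 7)  // 2
--     return [(x + x0, y + y0) for x, y in raw]
-- ===== SOURCE B (Python) =====
-- WIDTH  = 64
--
-- HEIGHT = 64
--
-- # Glyph pixel offsets (col, row), pre-decoded from the font bitmaps in
-- # column-major order (col 0..4, row 0..6), replacing runtime bit-testing.
-- _PIXELS = {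
--     'P': ((0, 0), (0, 1), (0, 2), (0, 3), (0, 4), (0, 5), (0, 6), (1, 0),
--           (1, 3), (2, 0), (2, 3), (3, 0), (3, 3), (4, 1), (4, 2)),
--     'A': ((0, 1), (0, 2), (0, 3), (0, 4), (0, 5), (0, 6), (1, 0), (1, 4),
--           (2, 0), (2, 4), (3, 0), (3, 4), (4, 1), (4, 2), (4, 3), (4, 4),
--           (4, 5), (4, 6)),
--     'R': ((0, 0), (0, 1), (0, 2), (0, 3), (0, 4), (0, 5), (0, 6), (1, 0),
--           (1, 3), (2, 0), (2, 3), (2, 4), (3, 0), (3, 3), (3, 5), (4, 1),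
--           (4, 2), (4, 6)),
--     'S': ((0, 1), (0, 2), (0, 6), (1, 0), (1, 3), (1, 6), (2, 0), (2, 3),
--           (2, 6), (3, 0), (3, 3), (3, 6), (4, 0), (4, 4), (4, 5)),
-- }
--
-- def _build_text_pixels(text: str) -> list[tuple[int, int]]:
--     # Every character (known or not) occupies a 6-wide cell, so the layout
--     # offsets are known up front; one flat comprehension over pre-decoded
--     # glyph pixel lists emits the final absolute coordinates.
--     x0 = (WIDTH - (6 * len(text) - 1)) // 2
--     y0 = (HEIGHT - 7) // 2
--     return [(6 * i + dx + x0, dy + y0)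
--             for i, ch in enumerate(text)
--             for dx, dy in _PIXELS.get(ch.upper(), ())]
-- ===== Notes on version B (the rewrite author's own statement) =====
-- stated objective: simpler
-- what changed: B replaces runtime bitmask decoding and the build-then-offset two-pass with a pre-decoded glyph pixel-offset table and a single flat comprehension that emits final absolute coordinates from closed-form layout offsets (x0 from tw = 6*len(text)-1, cell x = 6*i).
import Mathlib
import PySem

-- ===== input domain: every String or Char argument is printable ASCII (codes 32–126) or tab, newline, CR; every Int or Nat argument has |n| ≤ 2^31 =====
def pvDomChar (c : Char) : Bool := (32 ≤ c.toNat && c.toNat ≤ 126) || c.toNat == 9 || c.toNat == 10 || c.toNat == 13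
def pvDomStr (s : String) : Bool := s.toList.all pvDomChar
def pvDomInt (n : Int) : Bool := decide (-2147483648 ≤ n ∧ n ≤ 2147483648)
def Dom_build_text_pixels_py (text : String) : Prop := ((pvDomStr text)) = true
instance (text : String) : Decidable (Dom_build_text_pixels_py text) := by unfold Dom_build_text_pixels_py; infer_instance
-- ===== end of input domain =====

-- B replaces runtime bitmask decoding by a pre-decoded glyph pixel-offset table and emits
-- final absolute coordinates as one flat comprehension with closed-form layout offsets.


-- ===== PORT A =====
-- ch.upper() on a single char: exact on the ASCII domain (Dom admits only ASCII chars)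
def pyUpperChar (c : Char) : Char :=
  if 97 ≤ c.toNat ∧ c.toNat ≤ 122 then Char.ofNat (c.toNat - 32) else c

-- _FONT.get(ch.upper())
def fontGet (c : Char) : Option (List Nat) :=
  let u := pyUpperChar c
  if u = 'P' then some [0x7F, 0x09, 0x09, 0x09, 0x06]
  else if u = 'A' then some [0x7E, 0x11, 0x11, 0x11, 0x7E]
  else if u = 'R' then some [0x7F, 0x09, 0x19, 0x29, 0x46]
  else if u = 'S' then some [0x46, 0x49, 0x49, 0x49, 0x31]
  else none

-- inner 'for row in range(7): if byte & (1 << row): raw.append((cx + col, row))'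
def rowsA (cx : Int) (col : Nat) (byte : Nat) : List (Int × Int) :=
  (List.range 7).foldl
    (fun acc row => if Nat.land byte (1 <<< row) ≠ 0 then acc ++ [(cx + (col : Int), (row : Int))] else acc) []

-- 'for col, byte in enumerate(bm)'
def emitA (cx : Int) (col : Nat) : List Nat → List (Int × Int)
  | [] => []
  | b :: rest => rowsA cx col b ++ emitA cx (col + 1) rest

-- the 'for ch in text' loop: state (raw, cx)
def loopA : List Char → List (Int × Int) → Int → List (Int × Int) × Int
  | [], raw, cx => (raw, cx)
  | c :: cs, raw, cx =>
    match fontGet c with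
    | none => loopA cs raw (cx + 6)
    | some bm => loopA cs (raw ++ emitA cx 0 bm) (cx + 6)

def build_text_pixels_py (text : String) : List (Int × Int) :=
  let st := loopA text.toList [] 0
  let tw := st.2 - 1
  let x0 := PySem.Int.floordiv (64 - tw) 2
  let y0 := PySem.Int.floordiv (64 - 7) 2
  st.1.map (fun p => (p.1 + x0, p.2 + y0))

-- ===== PORT B =====
-- _PIXELS.get(ch.upper(), ()): the pre-decoded glyph pixel-offset table of Source B
def pixelsGet (c : Char) : List (Int × Int) :=
  let u := pyUpperChar c
  if u = 'P' then [(0, 0), (0, 1), (0, 2), (0, 3), (0, 4), (0, 5), (0, 6), (1, 0),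
                   (1, 3), (2, 0), (2, 3), (3, 0), (3, 3), (4, 1), (4, 2)]
  else if u = 'A' then [(0, 1), (0, 2), (0, 3), (0, 4), (0, 5), (0, 6), (1, 0), (1, 4),
                        (2, 0), (2, 4), (3, 0), (3, 4), (4, 1), (4, 2), (4, 3), (4, 4),
                        (4, 5), (4, 6)]
  else if u = 'R' then [(0, 0), (0, 1), (0, 2), (0, 3), (0, 4), (0, 5), (0, 6), (1, 0),
                        (1, 3), (2, 0), (2, 3), (2, 4), (3, 0), (3, 3), (3, 5), (4, 1),
                        (4, 2), (4, 6)]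
  else if u = 'S' then [(0, 1), (0, 2), (0, 6), (1, 0), (1, 3), (1, 6), (2, 0), (2, 3),
                        (2, 6), (3, 0), (3, 3), (3, 6), (4, 0), (4, 4), (4, 5)]
  else []

-- Source B's flat comprehension over enumerate(text)
def build_text_pixels_py_alt (text : String) : List (Int × Int) :=
  let x0 := PySem.Int.floordiv (64 - (6 * (text.length : Int) - 1)) 2
  let y0 := PySem.Int.floordiv (64 - 7) 2
  (PySem.List.enumerate text.toList).flatMap
    (fun ic => (pixelsGet ic.2).map (fun p => (6 * ic.1 + p.1 + x0, p.2 + y0)))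

-- ===== PRECONDITION & SPEC =====
def Spec_build_text_pixels_py (text : String) (out : List (Int × Int)) : Prop := out = build_text_pixels_py_alt text
instance (text : String) (out : List (Int × Int)) : Decidable (Spec_build_text_pixels_py text out) := by unfold Spec_build_text_pixels_py; infer_instance

-- ===== CLAIM =====
def Claim_equal_build_text_pixels_py : Prop := ∀ (text : String), Dom_build_text_pixels_py text → Spec_build_text_pixels_py text (build_text_pixels_py text)

-- ===== LEMMAS AND PROOFS =====

-- final cx of A's loop is 6 * number of chars
theorem loopA_cx (cs : List Char) : ∀ raw cx, (loopA cs raw cx).2 = cx + 6 * cs.length := by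
  induction cs with
  | nil => intro raw cx; simp [loopA]
  | cons c cs ih =>
    intro raw cx
    cases h : fontGet c <;> simp [loopA, h, ih] <;> ring

-- rowsA at cx is rowsA at 0 shifted by cx
theorem rowsA_shift (cx : Int) (col byte : Nat) :
    rowsA cx col byte = (rowsA 0 col byte).map (fun p => (cx + p.1, p.2)) := by
  have key : ∀ (l : List Nat) (acc : List (Int × Int)),
      l.foldl (fun acc row => if Nat.land byte (1 <<< row) ≠ 0 then acc ++ [(cx + (col : Int), (row : Int))] else acc) (acc.map (fun p => (cx + p.1, p.2))) =
      (l.foldl (fun acc row => if Nat.land byte (1 <<< row) ≠ 0 then acc ++ [(0 + (col : Int), (row : Int))] else acc) acc).map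
          (fun p => (cx + p.1, p.2)) := by
    intro l
    induction l with
    | nil => intro acc; simp
    | cons r rs ih =>
      intro acc
      simp only [List.foldl_cons]
      by_cases hz : Nat.land byte (1 <<< r) = 0
      · rw [if_neg (not_not_intro hz), if_neg (not_not_intro hz)]; exact ih acc
      · rw [if_pos hz, if_pos hz, ← ih]
        simp
  simpa [rowsA] using key (List.range 7) []

theorem emitA_shift (cx : Int) (col : Nat) (bm : List Nat) :
    emitA cx col bm = (emitA 0 col bm).map (fun p => (cx + p.1, p.2)) := by
  induction bm generalizing col with
  | nil => simp [emitA]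
  | cons b rest ih => simp [emitA, rowsA_shift cx, ih]

-- a glyph emission at offset cx is its emission at 0, shifted
theorem glyph_one (bm : List Nat) (px : List (Int × Int)) (h : emitA 0 0 bm = px) (cx : Int) :
    emitA cx 0 bm = px.map (fun p => (cx + p.1, p.2)) := by
  rw [emitA_shift, h]

-- the per-character bitmask decoding of A equals B's pre-decoded pixel table, shifted to cx
theorem glyph_emit (c : Char) (cx : Int) :
    (match fontGet c with | none => ([] : List (Int × Int)) | some bm => emitA cx 0 bm) =
    (pixelsGet c).map (fun p => (cx + p.1, p.2)) := by
  simp only [fontGet, pixelsGet]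
  split_ifs with h1 h2 h3 h4
  · exact glyph_one _ _ (by decide) cx
  · exact glyph_one _ _ (by decide) cx
  · exact glyph_one _ _ (by decide) cx
  · exact glyph_one _ _ (by decide) cx
  · simp

-- A's accumulated raw list as a flat map over the enumerated characters
theorem loopA_fst (cs : List Char) : ∀ (raw : List (Int × Int)) (cx : Int) (s : Int), cx = 6 * s →
    (loopA cs raw cx).1 =
      raw ++ (PySem.List.enumerate cs s).flatMap
        (fun ic => (pixelsGet ic.2).map (fun p => (6 * ic.1 + p.1, p.2))) := by
  induction cs with
  | nil => intro raw cx s _; simp [loopA, PySem.List.enumerate_nil]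
  | cons c cs ih =>
    intro raw cx s hs
    subst hs
    have hstep : 6 * s + 6 = 6 * (s + 1) := by ring
    have hg := glyph_emit c (6 * s)
    cases h : fontGet c with
    | none =>
      simp only [loopA, h]
      rw [hstep, ih raw (6 * (s + 1)) (s + 1) rfl, PySem.List.enumerate_cons]
      have : (pixelsGet c).map (fun p => (6 * s + p.1, p.2)) = [] := by
        have := hg; simp only [h] at this; exact this.symm
      simp [List.flatMap_cons, this]
    | some bm =>
      simp only [loopA, h]
      rw [hstep, ih (raw ++ emitA (6 * s) 0 bm) (6 * (s + 1)) (s + 1) rfl, PySem.List.enumerate_cons]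
      have : emitA (6 * s) 0 bm = (pixelsGet c).map (fun p => (6 * s + p.1, p.2)) := by
        have := hg; simp only [h] at this; exact this
      simp [List.flatMap_cons, this]

-- ===== VERDICT =====
theorem build_text_pixels_py_spec : Claim_equal_build_text_pixels_py := by
  intro text _
  unfold Spec_build_text_pixels_py build_text_pixels_py build_text_pixels_py_alt
  dsimp only
  have hcx : (loopA text.toList [] 0).2 = 6 * (text.length : Int) := by
    simpa using loopA_cx text.toList [] 0
  rw [hcx, loopA_fst text.toList [] 0 0 (by ring)]
  simp [List.map_flatMap, Function.comp_def, add_assoc]
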